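-- pv_equiv track=rewrite | github.com/EmilioGalimberti/finalAED | practico/Actividades/ACT 9.py | palabra_exprsion_mo
-- ===== SOURCE A (Python) =====
-- def palabra_exprsion_mo(texto):
--                 cont_letras = 0
--                 car_anterior = 0
--                 caracter_mo = 0
--                 acumulador_mo = 0
--                 for caracter in texto:
--                     if caracter != " " and caracter != ".": #contador letra
--                         cont_letras += 1
--                         if car_anterior == "m" and caracter == "o":
--                             caracter_mo += 1
--                     else:
--                         if caracter_mo == 1:
--                             acumulador_mo +=1       #contador de palabra con solo una vez mo
--                         cont_letras = 0
--                         caracter_mo = 0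
--                     car_anterior = caracter
--                 return acumulador_mo
-- ===== SOURCE B (Python) =====
-- def palabra_exprsion_mo(texto):
--     return sum(1 for palabra in texto.replace('.', ' ').split(' ')
--                if palabra.count('mo') == 1)
-- ===== Notes on version B (the rewrite author's own statement) =====
-- stated objective: simpler
-- what changed: Replaces A's one-pass per-character state machine (four mutable counters tracking previous char and per-word 'mo' count) with a two-phase decomposition: normalize '.' to ' ', split into tokens, and count tokens containing exactly one 'mo'.
-- intended difference: On texts whose final run of non-delimiter characters contains exactly one 'mo' (i.e. the text does not end in ' ' or '.'), A returns a count that omits that final word because its loop only counts a word when a delimiter closes it, while B counts it; counting every word is the intended behaviour. — e.g. on palabra_exprsion_mo("mole"): A returns 0, B returns 1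
import Mathlib
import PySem

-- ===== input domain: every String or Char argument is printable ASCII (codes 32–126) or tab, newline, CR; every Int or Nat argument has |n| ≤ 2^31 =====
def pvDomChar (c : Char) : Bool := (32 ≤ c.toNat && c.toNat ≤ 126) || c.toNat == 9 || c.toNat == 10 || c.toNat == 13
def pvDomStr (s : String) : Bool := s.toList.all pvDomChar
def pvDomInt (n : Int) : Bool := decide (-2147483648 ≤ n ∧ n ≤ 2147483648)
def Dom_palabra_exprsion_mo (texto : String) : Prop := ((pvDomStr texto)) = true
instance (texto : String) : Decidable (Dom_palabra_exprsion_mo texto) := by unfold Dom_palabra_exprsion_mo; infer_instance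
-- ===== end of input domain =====

-- B replaces A's one-pass per-character state machine by a tokenize-then-count decomposition
-- (replace '.' by ' ', split on ' ', count tokens with exactly one "mo"); B also counts an
-- unterminated final word, which A drops — stated as the intended difference D_ below.

-- ===== PORT A =====
-- state = (cont_letras, car_anterior, caracter_mo, acumulador_mo); car_anterior starts as the
-- Python int 0, which never equals "m": ported as `none`.
def palabra_exprsion_mo (texto : String) : Int :=
  (texto.toList.foldl
    (fun (st : Int × Option Char × Int × Int) caracter =>
      if caracter ≠ ' ' ∧ caracter ≠ '.' then
        (st.1 + 1, some caracter,
         if st.2.1 = some 'm' ∧ caracter = 'o' then st.2.2.1 + 1 else st.2.2.1,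
         st.2.2.2)
      else
        (0, some caracter, 0,
         if st.2.2.1 = 1 then st.2.2.2 + 1 else st.2.2.2))
    (0, none, 0, 0)).2.2.2

-- ===== PORT B =====
-- sum(1 for palabra in texto.replace('.', ' ').split(' ') if palabra.count('mo') == 1)
def palabra_exprsion_mo_alt (texto : String) : Int :=
  (((PySem.Chars.splitOn (PySem.Chars.replace texto.toList ['.'] [' ']) [' ']).countP
      (fun palabra => PySem.Chars.count palabra ['m','o'] == 1) : Nat) : Int)

-- ===== PRECONDITION & SPEC =====
-- A's loop only counts a word when a delimiter (' ' or '.') closes it, so a final word with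
-- exactly one "mo" that runs to the end of the text is silently dropped by A; B counts it,
-- which is the intended behaviour of a word counter. D_ holds exactly on those inputs.
def D_palabra_exprsion_mo (texto : String) : Prop :=
  PySem.Chars.count ((texto.toList.reverse.takeWhile (fun c => !(c == ' ' || c == '.'))).reverse)
    ['m','o'] = 1
instance (texto : String) : Decidable (D_palabra_exprsion_mo texto) := by
  unfold D_palabra_exprsion_mo; infer_instance

def Spec_palabra_exprsion_mo (texto : String) (out : Int) : Prop :=
  ¬ D_palabra_exprsion_mo texto → out = palabra_exprsion_mo_alt texto
instance (texto : String) (out : Int) : Decidable (Spec_palabra_exprsion_mo texto out) := by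
  unfold Spec_palabra_exprsion_mo; infer_instance

def pvDiffWitness_palabra_exprsion_mo : String := "mole"
def pvDiffWitnessOut_palabra_exprsion_mo : Int × Int := (0, 1)

-- ===== CLAIM (what is proved, stated in full; the proofs are below) =====
def Claim_unchanged_palabra_exprsion_mo : Prop := ∀ (texto : String), Dom_palabra_exprsion_mo texto → Spec_palabra_exprsion_mo texto (palabra_exprsion_mo texto)
def Claim_changed_palabra_exprsion_mo : Prop := Dom_palabra_exprsion_mo (pvDiffWitness_palabra_exprsion_mo) ∧ D_palabra_exprsion_mo (pvDiffWitness_palabra_exprsion_mo) ∧ palabra_exprsion_mo (pvDiffWitness_palabra_exprsion_mo) = pvDiffWitnessOut_palabra_exprsion_mo.1 ∧ palabra_exprsion_mo_alt (pvDiffWitness_palabra_exprsion_mo) = pvDiffWitnessOut_palabra_exprsion_mo.2 ∧ pvDiffWitnessOut_palabra_exprsion_mo.1 ≠ pvDiffWitnessOut_palabra_exprsion_mo.2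
def Claim_exact_palabra_exprsion_mo : Prop := ∀ (texto : String), Dom_palabra_exprsion_mo texto → D_palabra_exprsion_mo texto → palabra_exprsion_mo texto ≠ palabra_exprsion_mo_alt texto

-- ===== LEMMAS AND PROOFS =====

-- delimiters and the "previous char was 'm', current is 'o'" contribution
def pvDelim (c : Char) : Bool := c == ' ' || c == '.'
def pvPair (p : Option Char) (c : Char) : Int := if p = some 'm' ∧ c = 'o' then 1 else 0
def pvSubst (c : Char) : Char := if c = '.' then ' ' else c

-- number of occurrences of "mo" in a word (pair count = non-overlapping count for "mo")
def pvCnt : List Char → Nat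
  | [] => 0
  | c :: t => (if c = 'm' ∧ t.head? = some 'o' then 1 else 0) + pvCnt t

-- pair count carried across a previous character
def pvCnt2 : Option Char → List Char → Int
  | _, [] => 0
  | p, c :: t => pvPair p c + pvCnt2 (some c) t

def pvConsHead (c : Char) : List (List Char) → List (List Char)
  | [] => [[c]]
  | w :: ws => (c :: w) :: ws

-- split on ' ' only / split on both delimiters
def pvSp : List Char → List (List Char)
  | [] => [[]]
  | c :: t => if c = ' ' then [] :: pvSp t else pvConsHead c (pvSp t)

def pvSp2 : List Char → List (List Char)
  | [] => [[]]
  | c :: t => if pvDelim c then [] :: pvSp2 t else pvConsHead c (pvSp2 t)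

-- per-token final values of caracter_mo, INCLUDING the unterminated final token
def pvTok : Option Char → Int → List Char → List Int
  | _, m, [] => [m]
  | p, m, c :: t =>
    if pvDelim c then m :: pvTok (some c) 0 t else pvTok (some c) (m + pvPair p c) t

theorem pvSp_ne_nil (l : List Char) : pvSp l ≠ [] := by
  cases l with
  | nil => simp [pvSp]
  | cons c t =>
    simp only [pvSp]; split
    · simp
    · cases h : pvSp t <;> simp [pvConsHead]

theorem pvSp2_ne_nil (l : List Char) : pvSp2 l ≠ [] := by
  cases l with
  | nil => simp [pvSp2]
  | cons c t =>
    simp only [pvSp2]; split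
    · simp
    · cases h : pvSp2 t <;> simp [pvConsHead]

theorem pvTok_ne_nil (p : Option Char) (m : Int) (l : List Char) : pvTok p m l ≠ [] := by
  induction l generalizing p m with
  | nil => simp [pvTok]
  | cons c t ih =>
    simp only [pvTok]; split
    · simp
    · exact ih _ _

theorem rep_go (fuel : Nat) : ∀ (l acc : List Char), l.length ≤ fuel →
    PySem.Chars.replace.go ['.'] [' '] fuel l acc = acc.reverse ++ l.map pvSubst := by
  induction fuel with
  | zero =>
    intro l acc h
    have : l = [] := List.eq_nil_of_length_eq_zero (by omega)
    subst this; simp [PySem.Chars.replace.go]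
  | succ n ih =>
    intro l acc h
    cases l with
    | nil => simp [PySem.Chars.replace.go]
    | cons c t =>
      simp only [PySem.Chars.replace.go, List.isPrefixOf, List.length_cons] at *
      by_cases hc : c = '.'
      · simp [hc, ih t _ (by omega), pvSubst]
      · have : ('.' == c) = false := by simpa using fun hh => hc hh.symm
        simp [this, ih t _ (by omega), pvSubst, hc]

theorem replace_dot (cs : List Char) :
    PySem.Chars.replace cs ['.'] [' '] = cs.map pvSubst := by
  simp [PySem.Chars.replace, rep_go cs.length cs [] (by omega)]

theorem split_go (fuel : Nat) : ∀ (l cur : List Char) (acc : List (List Char)), l.length ≤ fuel →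
    PySem.Chars.splitOn.go [' '] fuel l cur acc =
      acc.reverse ++ (match pvSp l with
        | [] => []
        | w :: ws => (cur.reverse ++ w) :: ws) := by
  induction fuel with
  | zero =>
    intro l cur acc h
    have : l = [] := List.eq_nil_of_length_eq_zero (by omega)
    subst this; simp [PySem.Chars.splitOn.go, pvSp]
  | succ n ih =>
    intro l cur acc h
    cases l with
    | nil => simp [PySem.Chars.splitOn.go, pvSp]
    | cons c t =>
      simp only [List.length_cons] at h
      by_cases hc : c = ' '
      · have hp : [' '].isPrefixOf (c :: t) = true := by simp [List.isPrefixOf, hc]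
        simp only [PySem.Chars.splitOn.go, hp, if_true, List.length_singleton, List.drop_succ_cons,
          List.drop_zero]
        rw [ih t [] _ (by omega)]
        simp only [pvSp, if_pos hc]
        cases h2 : pvSp t with
        | nil => exact absurd h2 (pvSp_ne_nil t)
        | cons w ws => simp
      · have hp : [' '].isPrefixOf (c :: t) = false := by
          simp [List.isPrefixOf]; exact fun hh => hc hh.symm
        simp only [PySem.Chars.splitOn.go, hp, Bool.false_eq_true, if_false]
        rw [ih t _ _ (by omega)]
        simp only [pvSp, if_neg hc]
        cases h2 : pvSp t with
        | nil => exact absurd h2 (pvSp_ne_nil t)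
        | cons w ws => simp [pvConsHead]

theorem splitOn_space (cs : List Char) :
    PySem.Chars.splitOn cs [' '] = pvSp cs := by
  rw [PySem.Chars.splitOn, split_go (cs.length + 1) cs [] [] (by omega)]
  cases h : pvSp cs with
  | nil => exact absurd h (pvSp_ne_nil cs)
  | cons w ws => simp

theorem count_go (fuel : Nat) : ∀ (l : List Char) (acc : Nat), l.length ≤ fuel →
    PySem.Chars.count.go ['m','o'] fuel l acc = acc + pvCnt l := by
  induction fuel with
  | zero =>
    intro l acc h
    have : l = [] := List.eq_nil_of_length_eq_zero (by omega)
    subst this; simp [PySem.Chars.count.go, pvCnt]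
  | succ n ih =>
    intro l acc h
    cases l with
    | nil => simp [PySem.Chars.count.go, pvCnt]
    | cons c t =>
      simp only [List.length_cons] at h
      by_cases hmo : c = 'm' ∧ t.head? = some 'o'
      · obtain ⟨t', ht⟩ : ∃ t', t = 'o' :: t' := by
          cases t with
          | nil => simp at hmo
          | cons d t' => simp at hmo; exact ⟨t', by simp [hmo.2]⟩
        subst ht
        have hp : ['m','o'].isPrefixOf (c :: 'o' :: t') = true := by
          simp [List.isPrefixOf, hmo.1]
        simp only [PySem.Chars.count.go, hp, if_true]
        have : (c :: 'o' :: t').drop (['m','o'].length) = t' := by simp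
        rw [this, ih t' _ (by simp at h; omega)]
        simp [pvCnt, hmo.1]
        omega
      · have hp : ['m','o'].isPrefixOf (c :: t) = false := by
          rcases not_and_or.mp hmo with hcm | hto
          · simp [List.isPrefixOf]
            intro hh; exact absurd hh.symm hcm
          · cases t with
            | nil => simp [List.isPrefixOf]
            | cons d t' =>
              simp at hto
              simp [List.isPrefixOf]
              intro _ hh; exact absurd hh.symm hto
        simp only [PySem.Chars.count.go, hp, Bool.false_eq_true, if_false]
        rw [ih t _ (by omega)]
        have : pvCnt (c :: t) = pvCnt t := by simp [pvCnt, hmo]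
        rw [this]

theorem count_mo (cs : List Char) : PySem.Chars.count cs ['m','o'] = pvCnt cs := by
  simp [PySem.Chars.count, count_go cs.length cs 0 (by omega)]

-- carried pair count = padded plain pair count
theorem pvCnt2_eq (l : List Char) : ∀ p, pvCnt2 p l =
    (if p = some 'm' ∧ l.head? = some 'o' then 1 else 0) + (pvCnt l : Int) := by
  induction l with
  | nil => intro p; simp [pvCnt2, pvCnt]
  | cons c t ih =>
    intro p
    simp only [pvCnt2, ih (some c), pvCnt, List.head?_cons, pvPair, Option.some.injEq]
    push_cast
    ring

theorem pvCnt2_ne_m {p : Option Char} (l : List Char) (h : p ≠ some 'm') :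
    pvCnt2 p l = (pvCnt l : Int) := by
  rw [pvCnt2_eq l p, if_neg (fun hc => h hc.1), zero_add]

theorem pvDelim_ne_m {c : Char} (h : pvDelim c = true) : (some c : Option Char) ≠ some 'm' := by
  rcases (by simpa [pvDelim] using h : c = ' ' ∨ c = '.') with h | h <;> simp [h]

-- splitting the substituted text on ' ' = splitting the text on both delimiters
theorem pvSp_subst (cs : List Char) : pvSp (cs.map pvSubst) = pvSp2 cs := by
  induction cs with
  | nil => simp [pvSp, pvSp2]
  | cons c t ih =>
    by_cases hc : pvDelim c
    · have : pvSubst c = ' ' := by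
        rcases (by simpa [pvDelim] using hc : c = ' ' ∨ c = '.') with h | h <;> simp [h, pvSubst]
      simp [pvSp, pvSp2, this, hc, ih]
    · have hcs : ¬ (c = ' ' ∨ c = '.') := by simpa [pvDelim] using hc
      have h1 : pvSubst c = c := by rw [pvSubst, if_neg (fun h => hcs (Or.inr h))]
      have h2 : ¬ c = ' ' := fun h => hcs (Or.inl h)
      simp [pvSp, pvSp2, h1, hc, h2, ih]

-- the token mo-counts, expressed through the splitter
theorem pvTok_eq (cs : List Char) : ∀ p m, pvTok p m cs =
    (match pvSp2 cs with
      | [] => []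
      | h :: tl => (m + pvCnt2 p h) :: tl.map (fun w => (pvCnt w : Int))) := by
  induction cs with
  | nil => intro p m; simp [pvTok, pvSp2, pvCnt2]
  | cons c t ih =>
    intro p m
    by_cases hc : pvDelim c
    · simp only [pvTok, hc, if_true, ih (some c) 0, pvSp2]
      cases h2 : pvSp2 t with
      | nil => exact absurd h2 (pvSp2_ne_nil t)
      | cons h tl =>
        simp [pvCnt2, pvCnt2_ne_m h (pvDelim_ne_m hc)]
    · simp only [pvTok, hc, Bool.false_eq_true, if_false, ih (some c) (m + pvPair p c), pvSp2]
      cases h2 : pvSp2 t with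
      | nil => exact absurd h2 (pvSp2_ne_nil t)
      | cons h tl =>
        simp only [pvConsHead, pvCnt2]
        ring_nf

-- mo + pvPair as A's branch writes it
theorem pvPair_ite (p : Option Char) (c : Char) (mo : Int) :
    (if p = some 'm' ∧ c = 'o' then mo + 1 else mo) = mo + pvPair p c := by
  simp only [pvPair]; split_ifs <;> ring

-- A's loop = acc + number of CLOSED tokens with exactly one "mo"
theorem A_loop (cs : List Char) : ∀ (cont : Int) (prev : Option Char) (mo acc : Int),
    (cs.foldl
      (fun (st : Int × Option Char × Int × Int) caracter =>
        if caracter ≠ ' ' ∧ caracter ≠ '.' then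
          (st.1 + 1, some caracter,
           if st.2.1 = some 'm' ∧ caracter = 'o' then st.2.2.1 + 1 else st.2.2.1,
           st.2.2.2)
        else
          (0, some caracter, 0,
           if st.2.2.1 = 1 then st.2.2.2 + 1 else st.2.2.2))
      (cont, prev, mo, acc)).2.2.2
      = acc + (((pvTok prev mo cs).dropLast.countP (fun k => k == 1) : Nat) : Int) := by
  induction cs with
  | nil => intro cont prev mo acc; simp [pvTok]
  | cons c t ih =>
    intro cont prev mo acc
    by_cases hc : pvDelim c
    · have hns : ¬ (c ≠ ' ' ∧ c ≠ '.') := by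
        rcases (by simpa [pvDelim] using hc : c = ' ' ∨ c = '.') with h | h <;> simp [h]
      simp only [List.foldl_cons, if_neg hns]
      rw [ih]
      simp only [pvTok, hc, if_true]
      rw [List.dropLast_cons_of_ne_nil (pvTok_ne_nil (some c) 0 t), List.countP_cons]
      split_ifs with h1 <;> simp_all <;> omega
    · have hs : (c ≠ ' ' ∧ c ≠ '.') := by
        constructor <;> · intro h; subst h; simp [pvDelim] at hc
      simp only [List.foldl_cons, if_pos hs]
      rw [ih]
      simp only [pvTok, hc, Bool.false_eq_true, if_false, pvPair_ite]

-- B = number of ALL tokens with exactly one "mo"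
theorem B_eq (texto : String) : palabra_exprsion_mo_alt texto =
    (((pvTok none 0 texto.toList).countP (fun k => k == 1) : Nat) : Int) := by
  unfold palabra_exprsion_mo_alt
  rw [replace_dot, splitOn_space, pvSp_subst, pvTok_eq]
  cases h2 : pvSp2 texto.toList with
  | nil => exact absurd h2 (pvSp2_ne_nil texto.toList)
  | cons h tl =>
    simp only [List.countP_cons, List.countP_map, count_mo, zero_add,
      pvCnt2_ne_m h (by simp : (none : Option Char) ≠ some 'm')]
    have hcast : ∀ w : List Char, ((fun k => k == (1:Int)) ∘ fun w : List Char => (pvCnt w : Int)) w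
        = (pvCnt w == 1) := by
      intro w
      simp only [Function.comp_apply, beq_iff_eq]
      by_cases hw : pvCnt w = 1 <;> simp [hw] <;> omega
    rw [funext hcast]
    have hch : ((pvCnt h : Int) == 1) = (pvCnt h == 1) := by
      by_cases hw : pvCnt h = 1 <;> simp [hw] <;> omega
    rw [hch]

theorem sp2_singleton (t : List Char) (h : ∀ c ∈ t, pvDelim c = false) : pvSp2 t = [t] := by
  induction t with
  | nil => simp [pvSp2]
  | cons c t ih =>
    have hc : pvDelim c = false := h c (by simp)
    simp [pvSp2, hc, ih (fun d hd => h d (by simp [hd])), pvConsHead]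

theorem sp2_singleton_inv (t : List Char) (w : List Char) (h : pvSp2 t = [w]) :
    w = t ∧ ∀ c ∈ t, pvDelim c = false := by
  induction t generalizing w with
  | nil =>
    simp [pvSp2] at h
    simp [h]
  | cons c t ih =>
    by_cases hc : pvDelim c
    · rw [pvSp2, if_pos hc] at h
      have := pvSp2_ne_nil t
      cases h2 : pvSp2 t <;> simp [h2] at h <;> simp_all
    · rw [pvSp2, if_neg hc] at h
      cases h2 : pvSp2 t with
      | nil => exact absurd h2 (pvSp2_ne_nil t)
      | cons w' ws =>
        rw [h2, pvConsHead] at h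
        simp only [List.cons.injEq] at h
        obtain ⟨hw, hws⟩ := h
        obtain ⟨hw', hall⟩ := ih w' (by rw [h2, hws])
        subst hw'
        refine ⟨hw.symm ▸ rfl, ?_⟩
        intro d hd
        rcases List.mem_cons.mp hd with h | h
        · subst h; simpa using hc
        · exact hall d h

-- the last token of the split is the final run of non-delimiters
theorem sp2_getLast (cs : List Char) :
    (pvSp2 cs).getLast? = some ((cs.reverse.takeWhile (fun c => !(c == ' ' || c == '.'))).reverse) := by
  induction cs with
  | nil => simp [pvSp2]
  | cons c t ih =>
    have hrev : (c :: t).reverse = t.reverse ++ [c] := by simp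
    by_cases hall : ∀ d ∈ t, pvDelim d = false
    · have htw : t.reverse.takeWhile (fun c => !(c == ' ' || c == '.')) = t.reverse := by
        rw [List.takeWhile_eq_self_iff]
        intro d hd
        have := hall d (by simpa using hd)
        simp only [pvDelim] at this
        simp [this]
      by_cases hc : pvDelim c
      · have hcb : (c == ' ' || c == '.') = true := by simpa [pvDelim] using hc
        rw [pvSp2, if_pos hc, hrev, List.takeWhile_append, if_pos (by rw [htw])]
        simp only [List.takeWhile_cons, hcb, Bool.not_true, Bool.false_eq_true, if_false,
          List.append_nil]
        cases h2 : pvSp2 t with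
        | nil => exact absurd h2 (pvSp2_ne_nil t)
        | cons w ws =>
          rw [h2] at ih
          rw [List.getLast?_cons_cons, ih, htw]
      · have hcb : (c == ' ' || c == '.') = false := by
          cases hb : (c == ' ' || c == '.') <;> simp_all [pvDelim]
        have hc1 : ¬ c = ' ' := by intro h; subst h; simp at hcb
        have hc2 : ¬ c = '.' := by intro h; subst h; simp at hcb
        rw [pvSp2, if_neg hc, sp2_singleton t hall, pvConsHead, hrev,
          List.takeWhile_append, if_pos (by rw [htw])]
        simp [List.takeWhile_cons, hc1, hc2, htw]
    · have htw : (t.reverse.takeWhile (fun c => !(c == ' ' || c == '.'))).length ≠ t.reverse.length := by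
        push_neg at hall
        obtain ⟨d, hd, hdel⟩ := hall
        intro hlen
        have hself := (List.takeWhile_sublist _).eq_of_length hlen
        have := List.takeWhile_eq_self_iff.mp hself d (by simpa using hd)
        have hdel' : (d == ' ' || d == '.') = true := by
          cases hb : (d == ' ' || d == '.') <;> simp_all [pvDelim]
        rw [hdel'] at this
        simp at this
      have hstep : ((c :: t).reverse.takeWhile (fun c => !(c == ' ' || c == '.'))) =
          (t.reverse.takeWhile (fun c => !(c == ' ' || c == '.'))) := by
        rw [hrev, List.takeWhile_append, if_neg htw]
      rw [hstep]
      by_cases hc : pvDelim c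
      · rw [pvSp2, if_pos hc]
        cases h2 : pvSp2 t with
        | nil => exact absurd h2 (pvSp2_ne_nil t)
        | cons w ws =>
          rw [h2] at ih
          rw [List.getLast?_cons_cons, ih]
      · rw [pvSp2, if_neg hc]
        cases h2 : pvSp2 t with
        | nil => exact absurd h2 (pvSp2_ne_nil t)
        | cons w ws =>
          cases ws with
          | nil =>
            exact absurd (sp2_singleton_inv t w h2).2 (by simpa using hall)
          | cons w2 ws' =>
            rw [h2] at ih
            rw [List.getLast?_cons_cons] at ih
            rw [pvConsHead, List.getLast?_cons_cons, ih]

theorem tok_getLast (cs : List Char) :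
    (pvTok none 0 cs).getLast? =
      some ((pvCnt ((cs.reverse.takeWhile (fun c => !(c == ' ' || c == '.'))).reverse) : Int)) := by
  rw [pvTok_eq]
  have hL := sp2_getLast cs
  cases h2 : pvSp2 cs with
  | nil => exact absurd h2 (pvSp2_ne_nil cs)
  | cons h tl =>
    rw [h2] at hL
    dsimp only
    cases tl with
    | nil =>
      have hL' : h = (cs.reverse.takeWhile (fun c => !(c == ' ' || c == '.'))).reverse := by
        simpa using hL
      subst hL'
      rw [List.map_nil, List.getLast?_singleton, zero_add, pvCnt2_ne_m _ (by simp)]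
    | cons w2 ws =>
      rw [List.map_cons, List.getLast?_cons_cons,
        show (((pvCnt w2 : Int)) :: List.map (fun w => (pvCnt w : Int)) ws)
          = List.map (fun w => (pvCnt w : Int)) (w2 :: ws) from rfl,
        List.getLast?_map]
      rw [List.getLast?_cons_cons] at hL
      rw [hL]
      simp

-- B = A + (1 if the final unterminated token has exactly one "mo" else 0)
theorem A_B (texto : String) : palabra_exprsion_mo_alt texto =
    palabra_exprsion_mo texto +
      (if D_palabra_exprsion_mo texto then 1 else 0) := by
  rw [B_eq]
  unfold palabra_exprsion_mo
  rw [A_loop]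
  have hne := pvTok_ne_nil (none : Option Char) 0 texto.toList
  have hlast : (pvTok none 0 texto.toList).getLast hne =
      (pvCnt ((texto.toList.reverse.takeWhile (fun c => !(c == ' ' || c == '.'))).reverse) : Int) := by
    have := tok_getLast texto.toList
    rwa [List.getLast?_eq_getLast hne, Option.some.injEq] at this
  conv_lhs => rw [← List.dropLast_append_getLast hne]
  rw [List.countP_append, List.countP_cons, List.countP_nil, hlast]
  have hD : D_palabra_exprsion_mo texto ↔
      pvCnt ((texto.toList.reverse.takeWhile (fun c => !(c == ' ' || c == '.'))).reverse) = 1 := by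
    unfold D_palabra_exprsion_mo
    rw [count_mo]
  by_cases hd : D_palabra_exprsion_mo texto
  · have hb : ((pvCnt ((texto.toList.reverse.takeWhile (fun c => !(c == ' ' || c == '.'))).reverse) : Int) == 1) = true := by
      simp only [beq_iff_eq]
      exact_mod_cast hD.mp hd
    rw [if_pos hd, hb, if_pos rfl]
    push_cast
    ring
  · have hb : ((pvCnt ((texto.toList.reverse.takeWhile (fun c => !(c == ' ' || c == '.'))).reverse) : Int) == 1) = false := by
      have h1 : pvCnt ((texto.toList.reverse.takeWhile (fun c => !(c == ' ' || c == '.'))).reverse) ≠ 1 :=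
        fun h => hd (hD.mpr h)
      simp only [beq_eq_false_iff_ne, ne_eq]
      exact fun hh => h1 (by exact_mod_cast hh)
    rw [if_neg hd, hb, if_neg (by simp)]
    push_cast
    ring

-- ===== VERDICT (by name: the statement is the Claim_ definition above) =====
theorem palabra_exprsion_mo_spec : Claim_unchanged_palabra_exprsion_mo := by
  intro texto _ hD
  rw [A_B texto, if_neg hD, add_zero]

theorem palabra_exprsion_mo_changed : Claim_changed_palabra_exprsion_mo := by
  unfold Claim_changed_palabra_exprsion_mo; decide

theorem palabra_exprsion_mo_tight : Claim_exact_palabra_exprsion_mo := by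
  intro texto _ hD h
  rw [A_B texto, if_pos hD] at h
  omega
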